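-- pv_equiv track=rewrite | github.com/cnjw2021/LumiNine | backend/core/utils/calendar_utils.py | get_monthly_center_star
-- ===== SOURCE A (Python) =====
-- _GROUP_START_STAR: dict[frozenset[int], int] = {
--     frozenset({1, 4, 7}): 8,  # 上元
--     frozenset({2, 5, 8}): 5,  # 中元
--     frozenset({3, 6, 9}): 2,  # 下元
-- }
--
-- def get_monthly_center_star(year_center_star: int, setsu_month_index: int) -> int:
--     """月盤の中宮星を算出する (逆行公式).
--
--     구성기학의 월반 중궁성은 연반 중궁성의 그룹(上元/中元/下元)에 따라
--     1월(寅月) 시작값이 결정되고, 이후 월이 진행될수록 역행(감소)한다.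
--
--     Args:
--         year_center_star: 해당 연도의 연반 중궁성 (1~9)
--         setsu_month_index: 절월(節月) 인덱스 (1=寅月/立春~ … 12=丑月/小寒~)
--
--     Returns:
--         월반 중궁성 (1~9)
--
--     Raises:
--         ValueError: year_center_star가 1~9 범위 밖일 경우
--         ValueError: setsu_month_index가 1~12 범위 밖일 경우
--     """
--     if not 1 <= year_center_star <= 9:
--         raise ValueError(f"year_center_star は 1~9 の範囲でなければなりません。got: {year_center_star}")
--     if not 1 <= setsu_month_index <= 12:
--         raise ValueError(f"setsu_month_index は 1~12 の範囲でなければなりません。got: {setsu_month_index}")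
--
--     # 1월(寅月) 시작 중궁성 결정
--     start: int | None = None
--     for group, first_star in _GROUP_START_STAR.items():
--         if year_center_star in group:
--             start = first_star
--             break
--     if start is None:
--         raise ValueError(f"年中宮 {year_center_star} のグループが特定できません。")
--
--     # 역행: 월이 진행될수록 1씩 감소 → (start - offset) % 9 (1-indexed)
--     offset = setsu_month_index - 1
--     result = ((start - 1 - offset) % 9) + 1
--     return result
-- ===== SOURCE B (Python) =====
-- def get_monthly_center_star(year_center_star: int, setsu_month_index: int) -> int:
--     if not 1 <= year_center_star <= 9:
--         raise ValueError(f"year_center_star は 1~9 の範囲でなければなりません。got: {year_center_star}")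
--     if not 1 <= setsu_month_index <= 12:
--         raise ValueError(f"setsu_month_index は 1~12 の範囲でなければなりません。got: {setsu_month_index}")
--
--     def step_back(star: int, steps: int) -> int:
--         # retrograde: each step moves the center star down one, wrapping 1 -> 9
--         for _ in range(steps):
--             star = star - 1 if star > 1 else 9
--         return star
--
--     # year star 1 begins the cycle at 8; each further year star retrogrades 3 steps,
--     # then each month past the first retrogrades one more step.
--     first_month_star = step_back(8, 3 * (year_center_star - 1))
--     return step_back(first_month_star, setsu_month_index - 1)
-- ===== Notes on version B (the rewrite author's own statement) =====
-- stated objective: alternative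
-- what changed: Replaces the group-table lookup plus modular formula by a direct simulation of the retrograde cycle: a one-step-back-with-wrap loop run 3*(year-1) times from the anchor 8 and then month-1 more times, with no table and no mod arithmetic.
import Mathlib
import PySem

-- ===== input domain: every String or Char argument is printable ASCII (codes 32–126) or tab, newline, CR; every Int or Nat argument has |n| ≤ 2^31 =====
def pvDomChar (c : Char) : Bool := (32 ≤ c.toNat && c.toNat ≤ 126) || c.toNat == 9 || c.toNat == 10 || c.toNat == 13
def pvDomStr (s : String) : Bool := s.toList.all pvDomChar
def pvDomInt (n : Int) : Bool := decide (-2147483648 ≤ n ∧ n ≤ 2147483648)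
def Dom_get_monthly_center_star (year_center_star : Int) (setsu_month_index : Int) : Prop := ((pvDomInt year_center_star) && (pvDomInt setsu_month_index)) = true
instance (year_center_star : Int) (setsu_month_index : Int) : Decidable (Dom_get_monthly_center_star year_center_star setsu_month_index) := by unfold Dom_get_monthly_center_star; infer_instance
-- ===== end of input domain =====

-- B replaces A's frozenset-group dict scan + modular formula by a direct simulation of the retrograde cycle (unit step-back-with-wrap loop); same values, no table and no mod.


-- ===== PORT A =====
-- the module-level dict _GROUP_START_STAR: frozenset keys as PySem.Set Int, insertion order
def pvGroupStartStar : List (PySem.Set Int × Int) :=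
  [(PySem.Set.ofList [1, 4, 7], 8), (PySem.Set.ofList [2, 5, 8], 5), (PySem.Set.ofList [3, 6, 9], 2)]

-- the 'for group, first_star in … : if year_center_star in group: start = first_star; break' loop
def pvFindStart (items : List (PySem.Set Int × Int)) (y : Int) : Option Int :=
  match items with
  | [] => none
  | (g, fs) :: rest => if g.contains y then some fs else pvFindStart rest y

def get_monthly_center_star (year_center_star : Int) (setsu_month_index : Int) : Int :=
  -- the two range guards raise ValueError: excluded by Pre_; the 'start is None' raise likewise outside Pre_
  match pvFindStart pvGroupStartStar year_center_star with
  | none => 0  -- unreachable inside Pre_ (A raises ValueError here)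
  | some start =>
    let offset := setsu_month_index - 1
    PySem.Int.mod (start - 1 - offset) 9 + 1

-- ===== PORT B =====
-- the 'for _ in range(steps): star = star - 1 if star > 1 else 9' helper
def pvStepBack (star : Int) : Nat → Int
  | 0 => star
  | n + 1 => pvStepBack (if star > 1 then star - 1 else 9) n

def get_monthly_center_star_alt (year_center_star : Int) (setsu_month_index : Int) : Int :=
  -- range(k) for negative k is empty, matching Int.toNat
  let first_month_star := pvStepBack 8 (3 * (year_center_star - 1)).toNat
  pvStepBack first_month_star (setsu_month_index - 1).toNat

-- ===== PRECONDITION & SPEC =====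
-- Pre_ excludes exactly the inputs on which both A and B raise ValueError (the two range checks)
def Pre_get_monthly_center_star (year_center_star : Int) (setsu_month_index : Int) : Prop :=
  1 ≤ year_center_star ∧ year_center_star ≤ 9 ∧ 1 ≤ setsu_month_index ∧ setsu_month_index ≤ 12
instance (year_center_star : Int) (setsu_month_index : Int) : Decidable (Pre_get_monthly_center_star year_center_star setsu_month_index) := by unfold Pre_get_monthly_center_star; infer_instance

def pvWitness_get_monthly_center_star : Int × Int := (5, 3)

def Spec_get_monthly_center_star (year_center_star : Int) (setsu_month_index : Int) (out : Int) : Prop := out = get_monthly_center_star_alt year_center_star setsu_month_index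
instance (year_center_star : Int) (setsu_month_index : Int) (out : Int) : Decidable (Spec_get_monthly_center_star year_center_star setsu_month_index out) := by unfold Spec_get_monthly_center_star; infer_instance

-- ===== CLAIM =====
def Claim_equal_get_monthly_center_star : Prop := ∀ (year_center_star : Int) (setsu_month_index : Int), Dom_get_monthly_center_star year_center_star setsu_month_index → Pre_get_monthly_center_star year_center_star setsu_month_index → Spec_get_monthly_center_star year_center_star setsu_month_index (get_monthly_center_star year_center_star setsu_month_index)

-- ===== LEMMAS AND PROOFS =====

-- ===== VERDICT =====
theorem get_monthly_center_star_spec : Claim_equal_get_monthly_center_star := by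
  intro y m _ hpre
  obtain ⟨h1, h2, h3, h4⟩ := hpre
  unfold Spec_get_monthly_center_star
  interval_cases y <;> interval_cases m <;> decide
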